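-- pv_equiv track=rewrite | github.com/LanluZ/manim-ai | app/ai_clients.py | _replace_section_marker
-- ===== SOURCE A (Python) =====
-- SECTION_MARKER = "# <<SECTION_BREAK>>"
--
-- def _replace_section_marker(code: str) -> str:
--     """将标记替换为 self.next_section()，并确保仅保留一个标记"""
--     lines = code.split('\n')
--     marker_indices = [i for i, line in enumerate(lines) if SECTION_MARKER in line]
--
--     if not marker_indices:
--         return code
--
--     # 替换第一个标记
--     first_idx = marker_indices[0]
--     indent = lines[first_idx][:len(lines[first_idx]) - len(lines[first_idx].lstrip())]
--     lines[first_idx] = f"{indent}self.next_section()"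
--
--     # 删除其他标记
--     for idx in reversed(marker_indices[1:]):
--         lines.pop(idx)
--
--     return "\n".join(lines)
-- ===== SOURCE B (Python) =====
-- SECTION_MARKER = "# <<SECTION_BREAK>>"
--
-- def _replace_section_marker(code: str) -> str:
--     """One forward pass: first marker line becomes indent+'self.next_section()', later marker lines are dropped."""
--     out = []
--     seen = False
--     for line in code.split('\n'):
--         if SECTION_MARKER in line:
--             if not seen:
--                 indent = line[:len(line) - len(line.lstrip())]
--                 out.append(indent + "self.next_section()")
--                 seen = True
--         else:
--             out.append(line)
--     return "\n".join(out)
-- ===== Notes on version B (the rewrite author's own statement) =====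
-- stated objective: simpler
-- what changed: Replaces A's three phases (collect all marker indices via enumerate, replace the first by index, pop the rest in reverse) by a single forward pass over the lines carrying a seen-first flag that emits the replacement once and skips later marker lines.
import Mathlib
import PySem

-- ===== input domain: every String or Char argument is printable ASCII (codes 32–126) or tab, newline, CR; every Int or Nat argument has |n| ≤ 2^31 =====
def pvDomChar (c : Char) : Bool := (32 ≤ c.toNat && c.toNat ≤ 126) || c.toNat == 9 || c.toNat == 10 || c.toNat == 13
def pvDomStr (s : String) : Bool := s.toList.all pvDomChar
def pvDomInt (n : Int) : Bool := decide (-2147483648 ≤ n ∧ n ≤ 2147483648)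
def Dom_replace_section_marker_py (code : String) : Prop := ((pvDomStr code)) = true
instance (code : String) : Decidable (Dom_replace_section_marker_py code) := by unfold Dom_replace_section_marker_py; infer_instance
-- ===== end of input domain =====

-- B replaces A's three phases (index collection, replace-by-index, reverse pops) by one
-- forward pass with a seen-first flag; objective: simpler.

-- SECTION_MARKER
def pvMarker : List Char := "# <<SECTION_BREAK>>".toList

-- the replacement line f"{indent}self.next_section()" with indent = line[:len(line) - len(line.lstrip())]
-- (both Pythons contain this exact expression)
def pvNewLine (line : List Char) : List Char :=
  PySem.Chars.slice line none (some ((line.length : Int) - ((PySem.Chars.lstrip line).length : Int)))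
    ++ "self.next_section()".toList

-- ===== PORT A =====
-- lines.pop(idx); the none branch (Python: IndexError) is never reached here: every popped idx is valid
def pvPop (ls : List (List Char)) (idx : Int) : List (List Char) :=
  match PySem.List.pop? ls idx with
  | some r => r.2
  | none => ls

def replace_section_marker_py (code : String) : String :=
  let lines := PySem.Chars.splitOn code.toList ['\n']
  let marker_indices :=
    ((PySem.List.enumerate lines).filter (fun p => PySem.Chars.isIn pvMarker p.2)).map (fun p => p.1)
  match marker_indices with
  | [] => code
  | first_idx :: rest =>
    let line := (PySem.List.pyGet? lines first_idx).getD []  -- lines[first_idx]: in range, default never used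
    let lines := lines.set first_idx.toNat (pvNewLine line)  -- first_idx ≥ 0: toNat exact
    let lines := rest.reverse.foldl pvPop lines
    String.ofList (PySem.Chars.join ['\n'] lines)

-- ===== PORT B =====
-- the for-loop of Source B: one pass, `seen` is the boolean flag, output built structurally
def pvPassB (seen : Bool) : List (List Char) → List (List Char)
  | [] => []
  | l :: ls =>
    if PySem.Chars.isIn pvMarker l then
      if seen then pvPassB true ls
      else pvNewLine l :: pvPassB true ls
    else l :: pvPassB seen ls

def replace_section_marker_py_alt (code : String) : String :=
  String.ofList (PySem.Chars.join ['\n'] (pvPassB false (PySem.Chars.splitOn code.toList ['\n'])))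

-- ===== PRECONDITION & SPEC =====
def Spec_replace_section_marker_py (code : String) (out : String) : Prop := out = replace_section_marker_py_alt code
instance (code : String) (out : String) : Decidable (Spec_replace_section_marker_py code out) := by unfold Spec_replace_section_marker_py; infer_instance

-- ===== CLAIM (what is proved, stated in full; the proofs are below) =====
def Claim_equal_replace_section_marker_py : Prop := ∀ (code : String), Dom_replace_section_marker_py code → Spec_replace_section_marker_py code (replace_section_marker_py code)

-- ===== LEMMAS AND PROOFS =====

-- reference splitter: split on a single character, recursively
def mySplit (c : Char) : List Char → List (List Char)
  | [] => [[]]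
  | a :: t =>
    if a = c then [] :: mySplit c t
    else
      match mySplit c t with
      | [] => [[a]]
      | h :: r => (a :: h) :: r

lemma mySplit_ne_nil (c : Char) (l : List Char) : mySplit c l ≠ [] := by
  cases l with
  | nil => simp [mySplit]
  | cons a t =>
    simp only [mySplit]
    split
    · simp
    · split <;> simp

lemma go_eq (c : Char) : ∀ (fuel : Nat) (l cur : List Char) (acc : List (List Char)),
    l.length ≤ fuel →
    PySem.Chars.splitOn.go [c] fuel l cur acc =
      acc.reverse ++ ((cur.reverse ++ (mySplit c l).headI) :: (mySplit c l).tail) := by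
  intro fuel
  induction fuel with
  | zero =>
    intro l cur acc h
    have : l = [] := by
      cases l with
      | nil => rfl
      | cons a t => simp at h
    subst this
    simp [PySem.Chars.splitOn.go, mySplit]
  | succ f ih =>
    intro l cur acc h
    cases l with
    | nil => simp [PySem.Chars.splitOn.go, mySplit]
    | cons a t =>
      have hlen : t.length ≤ f := by simp at h; omega
      simp only [PySem.Chars.splitOn.go]
      by_cases hac : a = c
      · subst hac
        simp only [List.isPrefixOf, BEq.rfl, Bool.true_and, if_true, List.length_singleton]
        rw [ih (List.drop 1 (a :: t)) [] ((cur.reverse) :: acc) (by simpa using hlen)]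
        cases hmt : mySplit a t with
        | nil => exact absurd hmt (mySplit_ne_nil a t)
        | cons x xs => simp [mySplit, hmt]
      · have hpre : List.isPrefixOf [c] (a :: t) = false := by
          simp [List.isPrefixOf]
          intro hca
          exact hac (by simpa using hca.symm)
        simp only [hpre, Bool.false_eq_true, if_false]
        rw [ih t (a :: cur) acc hlen]
        cases hmt : mySplit c t with
        | nil => exact absurd hmt (mySplit_ne_nil c t)
        | cons x xs => simp [mySplit, hac, hmt]

lemma splitOn_eq_mySplit (c : Char) (s : List Char) :
    PySem.Chars.splitOn s [c] = mySplit c s := by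
  unfold PySem.Chars.splitOn
  rw [go_eq c (s.length + 1) s [] [] (by omega)]
  cases hms : mySplit c s with
  | nil => exact absurd hms (mySplit_ne_nil c s)
  | cons x xs => simp

lemma join_mySplit (c : Char) (s : List Char) :
    PySem.Chars.join [c] (mySplit c s) = s := by
  induction s with
  | nil => simp [mySplit, PySem.Chars.join_singleton]
  | cons a t ih =>
    by_cases hac : a = c
    · subst hac
      have hsplit : mySplit a (a :: t) = [] :: mySplit a t := by simp [mySplit]
      rw [hsplit]
      cases hmt : mySplit a t with
      | nil => exact absurd hmt (mySplit_ne_nil a t)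
      | cons x xs =>
        rw [PySem.Chars.join_cons_cons]
        rw [hmt] at ih
        simp [ih]
    · cases hmt : mySplit c t with
      | nil => exact absurd hmt (mySplit_ne_nil c t)
      | cons x xs =>
        have hsplit : mySplit c (a :: t) = (a :: x) :: xs := by simp [mySplit, hac, hmt]
        rw [hmt] at ih
        rw [hsplit]
        cases xs with
        | nil =>
          rw [PySem.Chars.join_singleton] at ih
          rw [PySem.Chars.join_singleton, ih]
        | cons y ys =>
          rw [PySem.Chars.join_cons_cons] at ih ⊢
          rw [List.cons_append, List.cons_append, ih]

-- marker indices, as plain naturals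
def mIdx : List (List Char) → List Nat
  | [] => []
  | l :: t => if PySem.Chars.isIn pvMarker l then 0 :: (mIdx t).map (· + 1) else (mIdx t).map (· + 1)

lemma enum_filter_eq_mIdx : ∀ (ls : List (List Char)) (s : Int),
    ((PySem.List.enumerate ls s).filter (fun p => PySem.Chars.isIn pvMarker p.2)).map (fun p => p.1)
      = (mIdx ls).map (fun n : Nat => s + (n : Int)) := by
  intro ls
  induction ls with
  | nil => intro s; simp [PySem.List.enumerate, mIdx]
  | cons l t ih =>
    intro s
    rw [PySem.List.enumerate_cons]
    by_cases hm : PySem.Chars.isIn pvMarker l = true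
    · simp only [List.filter_cons, hm, if_true, List.map_cons, mIdx, List.map_map]
      rw [ih (s + 1)]
      congr 1
      · simp
      · apply List.map_congr_left
        intro n _
        simp only [Function.comp_apply]
        push_cast
        ring
    · simp only [List.filter_cons, hm, Bool.false_eq_true, if_false, mIdx]
      rw [ih (s + 1), List.map_map]
      apply List.map_congr_left
      intro n _
      simp only [Function.comp_apply]
      push_cast
      ring

lemma pvPop_cast_succ (x : List Char) (ls : List (List Char)) (n : Nat) :
    pvPop (x :: ls) ((n + 1 : Nat) : Int) = x :: pvPop ls ((n : Nat) : Int) := by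
  by_cases h : n < ls.length
  · rw [pvPop, PySem.List.pop?_natCast (x :: ls) (n + 1) (by simp; omega)]
    rw [pvPop, PySem.List.pop?_natCast ls n h]
    simp
  · have h1 : PySem.List.pyIdx? (x :: ls).length ((n + 1 : Nat) : Int) = none := by
      unfold PySem.List.pyIdx?
      rw [if_pos (by omega), if_neg (by simp; omega)]
    have h2 : PySem.List.pyIdx? ls.length ((n : Nat) : Int) = none := by
      unfold PySem.List.pyIdx?
      rw [if_pos (by omega), if_neg (by omega)]
    unfold pvPop PySem.List.pop?
    rw [h1, h2]
    simp

lemma rev_map_shift (l : List Nat) :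
    ((l.map (· + 1)).map (fun n : Nat => (n : Int))).reverse
      = l.reverse.map (fun n : Nat => ((n + 1 : Nat) : Int)) := by
  simp [List.map_map, Function.comp]

lemma rev_map_cast (l : List Nat) :
    l.reverse.map (fun n : Nat => (n : Int)) = (l.map (fun n : Nat => (n : Int))).reverse := by
  simp

lemma foldl_pvPop_shift : ∀ (R : List Nat) (x : List Char) (ls : List (List Char)),
    (R.map (fun n : Nat => ((n + 1 : Nat) : Int))).foldl pvPop (x :: ls)
      = x :: (R.map (fun n : Nat => (n : Int))).foldl pvPop ls := by
  intro R
  induction R with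
  | nil => intro x ls; simp
  | cons n r ih =>
    intro x ls
    simp only [List.map_cons, List.foldl_cons]
    rw [pvPop_cast_succ, ih]

lemma foldl_pvPop_mIdx_eq_filter : ∀ (ls : List (List Char)),
    (((mIdx ls).map (fun n : Nat => (n : Int))).reverse).foldl pvPop ls
      = ls.filter (fun l => !PySem.Chars.isIn pvMarker l) := by
  intro ls
  induction ls with
  | nil => simp [mIdx]
  | cons l t ih =>
    by_cases hm : PySem.Chars.isIn pvMarker l = true
    · simp only [mIdx, hm, if_true, List.map_cons, List.reverse_cons]
      rw [List.foldl_append, rev_map_shift, foldl_pvPop_shift, rev_map_cast, ih]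
      simp only [List.foldl_cons, List.foldl_nil]
      rw [pvPop]
      simp only [Nat.cast_zero, PySem.List.pop?_zero_cons]
      simp [hm]
    · simp only [mIdx, hm, Bool.false_eq_true, if_false]
      rw [rev_map_shift, foldl_pvPop_shift, rev_map_cast, ih]
      simp [hm]

lemma pvPassB_true_eq_filter : ∀ (ls : List (List Char)),
    pvPassB true ls = ls.filter (fun l => !PySem.Chars.isIn pvMarker l) := by
  intro ls
  induction ls with
  | nil => simp [pvPassB]
  | cons l t ih =>
    by_cases hm : PySem.Chars.isIn pvMarker l = true
    · simp [pvPassB, hm, ih]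
    · simp [pvPassB, hm, ih]

lemma pvPassB_no_marker : ∀ (ls : List (List Char)), mIdx ls = [] → ∀ (seen : Bool), pvPassB seen ls = ls := by
  intro ls
  induction ls with
  | nil => intro _ seen; simp [pvPassB]
  | cons l t ih =>
    intro h seen
    by_cases hm : PySem.Chars.isIn pvMarker l = true
    · simp [mIdx, hm] at h
    · simp only [mIdx, hm, Bool.false_eq_true, if_false] at h
      have ht : mIdx t = [] := by simpa using h
      simp [pvPassB, hm, ih ht]

lemma main_marker : ∀ (ls : List (List Char)) (i : Nat) (r : List Nat), mIdx ls = i :: r →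
    ((r.map (fun n : Nat => (n : Int))).reverse).foldl pvPop
        (ls.set ((i : Int)).toNat (pvNewLine ((PySem.List.pyGet? ls ((i : Int))).getD [])))
      = pvPassB false ls := by
  intro ls
  induction ls with
  | nil => intro i r h; simp [mIdx] at h
  | cons l t ih =>
    intro i r h
    by_cases hm : PySem.Chars.isIn pvMarker l = true
    · simp only [mIdx, hm, if_true] at h
      injection h with hi hr
      subst hi
      subst hr
      rw [PySem.List.pyGet?_natCast]
      simp only [Int.toNat_natCast, List.getElem?_cons_zero, Option.getD_some, List.set_cons_zero]
      rw [rev_map_shift, foldl_pvPop_shift, rev_map_cast, foldl_pvPop_mIdx_eq_filter]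
      simp [pvPassB, hm, pvPassB_true_eq_filter]
    · simp only [mIdx, hm, Bool.false_eq_true, if_false] at h
      cases hmt : mIdx t with
      | nil => rw [hmt] at h; simp at h
      | cons i0 r0 =>
        rw [hmt] at h
        simp only [List.map_cons] at h
        injection h with hi hr
        subst hi
        subst hr
        rw [PySem.List.pyGet?_natCast]
        simp only [Int.toNat_natCast, List.getElem?_cons_succ, List.set_cons_succ]
        rw [rev_map_shift, foldl_pvPop_shift, rev_map_cast]
        have hih := ih i0 r0 hmt
        rw [PySem.List.pyGet?_natCast] at hih
        simp only [Int.toNat_natCast] at hih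
        rw [hih]
        simp [pvPassB, hm]

-- ===== VERDICT (by name: the statement is the Claim_ definition above) =====
theorem replace_section_marker_py_spec : Claim_equal_replace_section_marker_py := by
  unfold Claim_equal_replace_section_marker_py
  intro code _
  unfold Spec_replace_section_marker_py
  unfold replace_section_marker_py replace_section_marker_py_alt
  have hE : ((PySem.List.enumerate (PySem.Chars.splitOn code.toList ['\n'])).filter
        (fun p => PySem.Chars.isIn pvMarker p.2)).map (fun p => p.1)
      = (mIdx (PySem.Chars.splitOn code.toList ['\n'])).map (fun n : Nat => (n : Int)) := by
    rw [enum_filter_eq_mIdx _ 0]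
    apply List.map_congr_left
    intro n _
    omega
  dsimp only
  rw [hE]
  cases hmi : mIdx (PySem.Chars.splitOn code.toList ['\n']) with
  | nil =>
    simp only [List.map_nil]
    rw [pvPassB_no_marker _ hmi false]
    rw [splitOn_eq_mySplit, join_mySplit]
    simp
  | cons i r =>
    simp only [List.map_cons]
    rw [main_marker _ i r hmi]
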